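-- pv_equiv track=rewrite | github.com/dave-code-ruiz/uhomeuponor | custom_components/uhomeuponor/uponor_api/__init__.py | getStepValue
-- ===== SOURCE A (Python) =====
-- def getStepValue(id, therm):
--     #Obtain addr of THERMOSTAT_KEY, thermostatindex and controllerindex
--     #Obtain step jump between thermostats (40,80,..)
--     c=0
--     t=0
--     step=0
--     for i in range(4):
--         if id > 500:
--             id=id-500
--             c=c+1
--     id=id-80
--     for i in range(9):
--         if id > 40:
--             id=id-40
--             t=t+1
--     data_addr=id, t, c
--     if data_addr[0] in (11,25,28):
--         nextt=0
--         for t in therm: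
--            if nextt==1:
--                nextt=t
--            if t[0] == data_addr[1] and t[1] == data_addr[2]:
--                nextt=1
--         if nextt != 0 and nextt !=1 and nextt[1] == data_addr[2]:
--             step=(nextt[0]-data_addr[1])*40
--     return step
-- ===== SOURCE B (Python) =====
-- def getStepValue(id, therm):
--     # decode (rem, t, c) by closed-form capped division instead of the two loops
--     c = min(4, max(0, (id - 501) // 500 + 1))
--     id = id - 500 * c - 80
--     t = min(9, max(0, (id - 41) // 40 + 1))
--     rem = id - 40 * t
--     if rem not in (11, 25, 28):
--         return 0
--     last = None
--     for i, th in enumerate(therm):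
--         if th[0] == t and th[1] == c:
--             last = i
--     if last is None or last + 1 >= len(therm):
--         return 0
--     nxt = therm[last + 1]
--     return (nxt[0] - t) * 40 if nxt[1] == c else 0
-- ===== Notes on version B (the rewrite author's own statement) =====
-- stated objective: simpler
-- what changed: The two capped-subtraction decode loops are replaced by closed-form floor divisions, and the sentinel-valued scan (nextt cycling through 0/1/tuple) is replaced by a single pass recording the index of the last matching thermostat followed by a direct bounds-checked successor lookup.
import Mathlib
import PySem

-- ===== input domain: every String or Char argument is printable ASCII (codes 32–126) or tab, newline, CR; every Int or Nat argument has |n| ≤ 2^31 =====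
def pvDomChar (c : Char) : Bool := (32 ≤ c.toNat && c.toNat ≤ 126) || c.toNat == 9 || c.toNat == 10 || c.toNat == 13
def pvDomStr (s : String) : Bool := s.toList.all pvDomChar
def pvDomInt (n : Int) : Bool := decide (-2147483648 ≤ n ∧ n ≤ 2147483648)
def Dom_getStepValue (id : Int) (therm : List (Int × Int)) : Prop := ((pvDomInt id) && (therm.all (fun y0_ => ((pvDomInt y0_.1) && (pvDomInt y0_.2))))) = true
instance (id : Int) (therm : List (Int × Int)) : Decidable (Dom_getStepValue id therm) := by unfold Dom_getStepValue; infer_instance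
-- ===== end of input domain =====

-- B replaces the two capped-subtraction loops by closed-form floor divisions and the
-- sentinel-valued scan by a single last-matching-index pass (objective: simpler).

-- ===== PORT A =====
-- nextt's Python value set {0, 1, tuple} is encoded as Option (Option (Int × Int)):
-- none = 0, some none = 1, some (some p) = the tuple p.
def getStepValue (id : Int) (therm : List (Int × Int)) : Int :=
  let p1 := (PySem.List.pyRange 0 4 1).foldl
    (fun (p : Int × Int) _ => if p.1 > 500 then (p.1 - 500, p.2 + 1) else p) (id, 0)
  let id1 := p1.1 - 80
  let p2 := (PySem.List.pyRange 0 9 1).foldl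
    (fun (p : Int × Int) _ => if p.1 > 40 then (p.1 - 40, p.2 + 1) else p) (id1, 0)
  let dataAddr : Int × Int × Int := (p2.1, p2.2, p1.2)
  if dataAddr.1 = 11 ∨ dataAddr.1 = 25 ∨ dataAddr.1 = 28 then
    let nextt := therm.foldl
      (fun (n : Option (Option (Int × Int))) t =>
        let n' := if n = some none then some (some t) else n
        if t.1 = dataAddr.2.1 ∧ t.2 = dataAddr.2.2 then some none else n') none
    match nextt with
    | some (some nx) => if nx.2 = dataAddr.2.2 then (nx.1 - dataAddr.2.1) * 40 else 0
    | _ => 0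
  else 0

-- ===== PORT B =====
def getStepValue_alt (id : Int) (therm : List (Int × Int)) : Int :=
  let c := min 4 (max 0 (PySem.Int.floordiv (id - 501) 500 + 1))
  let id2 := id - 500 * c - 80
  let t := min 9 (max 0 (PySem.Int.floordiv (id2 - 41) 40 + 1))
  let rem := id2 - 40 * t
  if ¬(rem = 11 ∨ rem = 25 ∨ rem = 28) then 0
  else
    let last := (PySem.List.enumerate therm 0).foldl
      (fun (l : Option Int) (p : Int × (Int × Int)) =>
        if p.2.1 = t ∧ p.2.2 = c then some p.1 else l) none
    match last with
    | none => 0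
    | some L =>
      if L + 1 ≥ (therm.length : Int) then 0
      else
        let nx := PySem.List.pyGetD therm (L + 1) (0, 0)
        if nx.2 = c then (nx.1 - t) * 40 else 0

-- ===== PRECONDITION & SPEC =====
def Spec_getStepValue (id : Int) (therm : List (Int × Int)) (out : Int) : Prop := out = getStepValue_alt id therm
instance (id : Int) (therm : List (Int × Int)) (out : Int) : Decidable (Spec_getStepValue id therm out) := by unfold Spec_getStepValue; infer_instance

-- ===== CLAIM (what is proved, stated in full; the proofs are below) =====
def Claim_equal_getStepValue : Prop := ∀ (id : Int) (therm : List (Int × Int)), Dom_getStepValue id therm → Spec_getStepValue id therm (getStepValue id therm)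

-- ===== LEMMAS AND PROOFS =====

lemma cap500 : ∀ (n : Nat) (x : Int),
    (PySem.List.pyRange 0 n 1).foldl
      (fun (p : Int × Int) _ => if p.1 > 500 then (p.1 - 500, p.2 + 1) else p) (x, 0)
    = (x - 500 * min (n : Int) (max 0 ((x - 501) / 500 + 1)),
       min (n : Int) (max 0 ((x - 501) / 500 + 1))) := by
  intro n x
  induction n with
  | zero =>
    rw [PySem.List.pyRange_one_eq_nil (by norm_num)]
    have : min ((0:Nat) : Int) (max 0 ((x - 501) / 500 + 1)) = 0 := by omega
    rw [this]; norm_num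
  | succ n ih =>
    have hc : ((n+1 : Nat) : Int) = (n : Int) + 1 := by push_cast; ring
    rw [hc, PySem.List.pyRange_one_succ_right (by positivity), List.foldl_append, ih]
    simp only [List.foldl]
    split_ifs <;> simp only [Prod.mk.injEq] <;> constructor <;> omega

lemma cap40 : ∀ (n : Nat) (x : Int),
    (PySem.List.pyRange 0 n 1).foldl
      (fun (p : Int × Int) _ => if p.1 > 40 then (p.1 - 40, p.2 + 1) else p) (x, 0)
    = (x - 40 * min (n : Int) (max 0 ((x - 41) / 40 + 1)),
       min (n : Int) (max 0 ((x - 41) / 40 + 1))) := by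
  intro n x
  induction n with
  | zero =>
    rw [PySem.List.pyRange_one_eq_nil (by norm_num)]
    have : min ((0:Nat) : Int) (max 0 ((x - 41) / 40 + 1)) = 0 := by omega
    rw [this]; norm_num
  | succ n ih =>
    have hc : ((n+1 : Nat) : Int) = (n : Int) + 1 := by push_cast; ring
    rw [hc, PySem.List.pyRange_one_succ_right (by positivity), List.foldl_append, ih]
    simp only [List.foldl]
    split_ifs <;> simp only [Prod.mk.injEq] <;> constructor <;> omega

lemma decode500 (id : Int) :
    (PySem.List.pyRange 0 4 1).foldl
      (fun (p : Int × Int) _ => if p.1 > 500 then (p.1 - 500, p.2 + 1) else p) (id, 0)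
    = (id - 500 * min 4 (max 0 (PySem.Int.floordiv (id - 501) 500 + 1)),
       min 4 (max 0 (PySem.Int.floordiv (id - 501) 500 + 1))) := by
  have h := cap500 4 id
  norm_num at h
  rw [PySem.Int.floordiv_eq_ediv_of_pos (by norm_num)]
  exact h

lemma decode40 (id : Int) :
    (PySem.List.pyRange 0 9 1).foldl
      (fun (p : Int × Int) _ => if p.1 > 40 then (p.1 - 40, p.2 + 1) else p) (id, 0)
    = (id - 40 * min 9 (max 0 (PySem.Int.floordiv (id - 41) 40 + 1)),
       min 9 (max 0 (PySem.Int.floordiv (id - 41) 40 + 1))) := by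
  have h := cap40 9 id
  norm_num at h
  rw [PySem.Int.floordiv_eq_ediv_of_pos (by norm_num)]
  exact h

-- B's last-index fold over a snoc and its range invariant
lemma lastIdx_snoc (tv cv : Int) (xs : List (Int × Int)) (x : Int × Int) (s : Option Int) :
    (PySem.List.enumerate (xs ++ [x]) 0).foldl
      (fun (l : Option Int) (p : Int × (Int × Int)) =>
        if p.2.1 = tv ∧ p.2.2 = cv then some p.1 else l) s
    = if x.1 = tv ∧ x.2 = cv then some (xs.length : Int)
      else (PySem.List.enumerate xs 0).foldl
        (fun (l : Option Int) (p : Int × (Int × Int)) =>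
          if p.2.1 = tv ∧ p.2.2 = cv then some p.1 else l) s := by
  rw [PySem.List.enumerate_append, List.foldl_append]
  simp

lemma lastIdx_range (tv cv : Int) (xs : List (Int × Int)) (L : Int)
    (h : (PySem.List.enumerate xs 0).foldl
      (fun (l : Option Int) (p : Int × (Int × Int)) =>
        if p.2.1 = tv ∧ p.2.2 = cv then some p.1 else l) none = some L) :
    0 ≤ L ∧ L < (xs.length : Int) := by
  induction xs using List.reverseRecOn with
  | nil => simp [PySem.List.enumerate_nil] at h
  | append_singleton xs x ih =>
    rw [lastIdx_snoc] at h
    split_ifs at h with hm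
    · simp at h; simp [h]; omega
    · have := ih h; simp; omega

-- the sentinel scan of A equals the last-index description of B
lemma scan_eq (tv cv : Int) (xs : List (Int × Int)) :
    xs.foldl
      (fun (n : Option (Option (Int × Int))) t =>
        let n' := if n = some none then some (some t) else n
        if t.1 = tv ∧ t.2 = cv then some none else n') none
    = (match (PySem.List.enumerate xs 0).foldl
        (fun (l : Option Int) (p : Int × (Int × Int)) =>
          if p.2.1 = tv ∧ p.2.2 = cv then some p.1 else l) none with
      | none => (none : Option (Option (Int × Int)))
      | some L =>
        if L + 1 < (xs.length : Int) then some (some (PySem.List.pyGetD xs (L + 1) (0, 0)))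
        else some none) := by
  induction xs using List.reverseRecOn with
  | nil => simp [PySem.List.enumerate_nil]
  | append_singleton xs x ih =>
    rw [List.foldl_append, lastIdx_snoc, ih]
    by_cases hm : x.1 = tv ∧ x.2 = cv
    · have hn : ¬((xs.length : Int) + 1 < ((xs ++ [x]).length : Int)) := by
        simp only [List.length_append, List.length_cons, List.length_nil]; push_cast; omega
      simp [hm]
      try omega
    · rcases hB : (PySem.List.enumerate xs 0).foldl
        (fun (l : Option Int) (p : Int × (Int × Int)) =>
          if p.2.1 = tv ∧ p.2.2 = cv then some p.1 else l) none with _ | L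
      · simp [hm]
      · have hr := lastIdx_range tv cv xs L hB
        by_cases hlt : L + 1 < (xs.length : Int)
        · have hlt2 : L + 1 < ((xs ++ [x]).length : Int) := by
            simp only [List.length_append, List.length_cons, List.length_nil]; push_cast; omega
          have hL1 : L + 1 = (((L + 1).toNat : Nat) : Int) := by omega
          have hget : PySem.List.pyGetD (xs ++ [x]) (L + 1) (0, 0)
              = PySem.List.pyGetD xs (L + 1) (0, 0) := by
            rw [hL1, PySem.List.pyGetD_natCast, PySem.List.pyGetD_natCast,
                List.getD_eq_getElem?_getD, List.getD_eq_getElem?_getD,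
                List.getElem?_append_left (by omega)]
          simp [hm, hlt, hget]
          try omega
        · have hEq : L + 1 = (xs.length : Int) := by omega
          have hlt2 : L + 1 < ((xs ++ [x]).length : Int) := by
            simp only [List.length_append, List.length_cons, List.length_nil]; push_cast; omega
          have hget : PySem.List.pyGetD (xs ++ [x]) (L + 1) (0, 0) = x := by
            have hL1 : L + 1 = (((L + 1).toNat : Nat) : Int) := by omega
            have hN : (L + 1).toNat = xs.length := by omega
            rw [hL1, PySem.List.pyGetD_natCast, List.getD_eq_getElem?_getD, hN,
                List.getElem?_append_right (le_refl _)]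
            simp
          simp [hm, hlt, hget]
          try omega

-- ===== VERDICT (by name: the statement is the Claim_ definition above) =====
theorem getStepValue_spec : Claim_equal_getStepValue := by
  intro id therm _
  unfold Spec_getStepValue
  simp only [getStepValue, getStepValue_alt]
  rw [decode500, decode40]
  set c := min 4 (max 0 (PySem.Int.floordiv (id - 501) 500 + 1)) with hc
  set t := min 9 (max 0 (PySem.Int.floordiv (id - 500 * c - 80 - 41) 40 + 1)) with ht
  by_cases hmem : id - 500 * c - 80 - 40 * t = 11 ∨ id - 500 * c - 80 - 40 * t = 25 ∨
      id - 500 * c - 80 - 40 * t = 28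
  · rw [scan_eq t c therm]
    rcases hB : (PySem.List.enumerate therm 0).foldl
        (fun (l : Option Int) (p : Int × (Int × Int)) =>
          if p.2.1 = t ∧ p.2.2 = c then some p.1 else l) none with _ | L
    · simp [hmem]
    · by_cases hlt : L + 1 < (therm.length : Int)
      · simp [hmem, hlt, not_le.mpr hlt]
      · simp [hmem, hlt, le_of_not_gt (by simpa using hlt)]
  · simp [hmem]
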